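-- pv_equiv track=rewrite | github.com/seemoo-lab/BaseTrace | qmi-dissect/dissector/generate_lua.py | lua_tabs
-- ===== SOURCE A (Python) =====
-- def lua_tabs(lua_code: str) -> str:
--     """ Replace the space characters at the beginning of each line with tab characters. """
--     lines = []
--     for line in lua_code.splitlines():
--         # Replace all space characters at the beginning with tab characters
--         # https://stackoverflow.com/a/22149018
--         line_chars = list(line)
--         for index, char in enumerate(line_chars):
--             if char != " ":
--                 break
--             line_chars[index] = '\t'
--
--         # Append a new line character after each line
--         lines.append(f"{''.join(line_chars)}\n")
--
--     return "".join(lines)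
-- ===== SOURCE B (Python) =====
-- def lua_tabs(lua_code: str) -> str:
--     """ Replace the space characters at the beginning of each line with tab characters. """
--     out = []
--     for line in lua_code.splitlines():
--         stripped = line.lstrip(' ')
--         out.append('\t' * (len(line) - len(stripped)) + stripped + '\n')
--     return ''.join(out)
-- ===== Notes on version B (the rewrite author's own statement) =====
-- stated objective: simpler
-- what changed: Replaces the list(line)/enumerate-and-mutate-in-place loop with a single space-only lstrip prefix-length computation and tab-string repetition per line.
import Mathlib
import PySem

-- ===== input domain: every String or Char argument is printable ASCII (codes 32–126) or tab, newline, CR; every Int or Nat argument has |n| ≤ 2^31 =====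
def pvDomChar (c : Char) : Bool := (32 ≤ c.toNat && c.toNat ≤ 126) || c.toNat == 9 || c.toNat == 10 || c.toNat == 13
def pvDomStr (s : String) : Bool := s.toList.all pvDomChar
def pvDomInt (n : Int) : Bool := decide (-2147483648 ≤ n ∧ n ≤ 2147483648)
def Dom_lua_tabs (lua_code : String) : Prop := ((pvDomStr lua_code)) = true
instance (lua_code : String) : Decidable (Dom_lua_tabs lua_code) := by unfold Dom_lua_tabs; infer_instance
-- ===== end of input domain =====

-- B replaces A's enumerate-and-mutate loop by a per-line leading-space count (lstrip) plus tab repetition; objective: simpler.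

-- ===== PORT A =====
-- A's inner 'for index, char in enumerate(line_chars): if char != " ": break; line_chars[index] = "\t"':
-- walks the chars, rewriting each leading ' ' to '\t' in place and stopping at the first non-space.
def luaTabsFixA : List Char → List Char
  | [] => []
  | c :: rest => if c ≠ ' ' then c :: rest else '\t' :: luaTabsFixA rest

def lua_tabs (lua_code : String) : String :=
  -- lines = []; for line in splitlines: lines.append(''.join(line_chars) + '\n'); return ''.join(lines)
  String.mk (PySem.Chars.join []
    ((PySem.Chars.splitlines lua_code.toList).map (fun line => luaTabsFixA line ++ ['\n'])))

-- ===== PORT B =====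
def lua_tabs_alt (lua_code : String) : String :=
  -- stripped = line.lstrip(space) ported by hand as dropWhile (· == space) — exact: it drops exactly the leading spaces
  String.mk (PySem.Chars.join []
    ((PySem.Chars.splitlines lua_code.toList).map (fun line =>
      let stripped := line.dropWhile (· == ' ')
      List.replicate (line.length - stripped.length) '\t' ++ stripped ++ ['\n'])))

-- ===== PRECONDITION & SPEC =====
def Spec_lua_tabs (lua_code : String) (out : String) : Prop := out = lua_tabs_alt lua_code
instance (lua_code : String) (out : String) : Decidable (Spec_lua_tabs lua_code out) := by unfold Spec_lua_tabs; infer_instance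

-- ===== CLAIM (what is proved, stated in full; the proofs are below) =====
def Claim_equal_lua_tabs : Prop := ∀ (lua_code : String), Dom_lua_tabs lua_code → Spec_lua_tabs lua_code (lua_tabs lua_code)

-- ===== LEMMAS AND PROOFS =====
theorem luaTabsFixA_eq (cs : List Char) :
    luaTabsFixA cs =
      List.replicate (cs.length - (cs.dropWhile (· == ' ')).length) '\t' ++ cs.dropWhile (· == ' ') := by
  induction cs with
  | nil => simp [luaTabsFixA]
  | cons c rest ih =>
    by_cases h : c = ' '
    · have hle : (rest.dropWhile (· == ' ')).length ≤ rest.length := List.length_dropWhile_le _ _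
      simp [luaTabsFixA, h, List.dropWhile, ih]
      rw [Nat.succ_sub hle]
      simp [List.replicate_succ]
    · have hb : (c == ' ') = false := by simp [h]
      simp [luaTabsFixA, h, List.dropWhile_cons, hb]

-- ===== VERDICT (by name: the statement is the Claim_ definition above) =====
theorem lua_tabs_spec : Claim_equal_lua_tabs := by
  intro lua_code _
  unfold Spec_lua_tabs lua_tabs lua_tabs_alt
  rw [List.map_congr_left (fun line _ => ?_)]
  simp only [luaTabsFixA_eq]
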